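-- pv_equiv track=rewrite | github.com/mozilla/bugbot | auto_nag/history.py | get_pc
-- ===== SOURCE A (Python) =====
-- def get_pc(changes):
--     p = ''
--     c = ''
--     for change in changes:
--         if change.get('field_name') == 'component' and 'added' in change:
--             c = change['added']
--         if change.get('field_name') == 'product' and 'added' in change:
--             p = change['added']
--     return '{}::{}'.format(p, c)
-- ===== SOURCE B (Python) =====
-- def get_pc(changes):
--     changes = list(changes)
--     p = ''
--     c = ''
--     found_p = False
--     found_c = False
--     for change in reversed(changes):
--         fn = change.get('field_name')
--         if not found_p and fn == 'product' and 'added' in change: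
--             p = change['added']
--             found_p = True
--         elif not found_c and fn == 'component' and 'added' in change:
--             c = change['added']
--             found_c = True
--         if found_p and found_c:
--             break
--     return '{}::{}'.format(p, c)
-- ===== Notes on version B (the rewrite author's own statement) =====
-- stated objective: alternative
-- what changed: B scans the changes in reverse, keeping the first product/component 'added' value it meets and breaking out as soon as both are found, instead of A's forward scan that overwrites p and c on every match.
import Mathlib
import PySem

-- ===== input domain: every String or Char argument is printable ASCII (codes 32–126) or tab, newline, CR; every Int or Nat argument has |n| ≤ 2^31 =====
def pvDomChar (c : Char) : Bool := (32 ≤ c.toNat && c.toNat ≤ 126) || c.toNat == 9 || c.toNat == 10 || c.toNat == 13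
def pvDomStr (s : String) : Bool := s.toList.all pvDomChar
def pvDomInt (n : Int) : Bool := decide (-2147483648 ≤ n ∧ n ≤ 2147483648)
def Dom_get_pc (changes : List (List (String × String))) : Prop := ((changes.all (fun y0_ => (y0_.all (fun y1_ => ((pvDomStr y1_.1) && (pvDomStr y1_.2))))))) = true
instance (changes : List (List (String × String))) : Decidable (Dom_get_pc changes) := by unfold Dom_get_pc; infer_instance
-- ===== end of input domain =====

-- B scans the changes in reverse with an early break once both values are found; same return value as A, no side effects.

-- ===== PORT A =====
/-- the body of A's for-loop -/
def stepA (pc : String × String) (change : List (String × String)) : String × String :=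
  let d := PySem.Dict.mk change
  let c' := if d.get? "field_name" == some "component" && d.contains "added" then
              (d.get? "added").getD pc.2 else pc.2
  let p' := if d.get? "field_name" == some "product" && d.contains "added" then
              (d.get? "added").getD pc.1 else pc.1
  (p', c')

def get_pc (changes : List (List (String × String))) : String :=
  let pc := changes.foldl stepA ("", "")
  pc.1 ++ "::" ++ pc.2

-- ===== PORT B =====
/-- B's reverse scan with early break: walks the (already reversed) list, keeping
the first product/component "added" values it meets. -/
def getPcGo : List (List (String × String)) → Bool → Bool → String → String → String × String
  | [], _, _, p, c => (p, c)
  | change :: rest, fp, fc, p, c =>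
    let d := PySem.Dict.mk change
    let fn := d.get? "field_name"
    if !fp && fn == some "product" && d.contains "added" then
      let p' := (d.get? "added").getD p
      if fc then (p', c) else getPcGo rest true fc p' c
    else if !fc && fn == some "component" && d.contains "added" then
      let c' := (d.get? "added").getD c
      if fp then (p, c') else getPcGo rest fp true p c'
    else
      if fp && fc then (p, c) else getPcGo rest fp fc p c

def get_pc_alt (changes : List (List (String × String))) : String :=
  let pc := getPcGo changes.reverse false false "" ""
  pc.1 ++ "::" ++ pc.2

-- ===== PRECONDITION & SPEC =====
def Spec_get_pc (changes : List (List (String × String))) (out : String) : Prop := out = get_pc_alt changes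
instance (changes : List (List (String × String))) (out : String) : Decidable (Spec_get_pc changes out) := by unfold Spec_get_pc; infer_instance

-- ===== CLAIM (what is proved, stated in full; the proofs are below) =====
def Claim_equal_get_pc : Prop := ∀ (changes : List (List (String × String))), Dom_get_pc changes → Spec_get_pc changes (get_pc changes)

-- ===== LEMMAS AND PROOFS =====

/-- the `product` "added" value of a change, if any -/
def hitP (d : PySem.Dict String String) : Option String :=
  if d.get? "field_name" == some "product" && d.contains "added" then d.get? "added" else none

/-- the `component` "added" value of a change, if any -/
def hitC (d : PySem.Dict String String) : Option String :=
  if d.get? "field_name" == some "component" && d.contains "added" then d.get? "added" else none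

lemma get?_some_of_contains (d : PySem.Dict String String) (k : String)
    (h : d.contains k = true) : ∃ v, d.get? k = some v := by
  rw [PySem.Dict.contains_eq_isSome_get?] at h
  exact Option.isSome_iff_exists.mp h

lemma pickP (d : PySem.Dict String String) (x : String) :
    (if d.get? "field_name" == some "product" && d.contains "added" then
       (d.get? "added").getD x else x) = (hitP d).getD x := by
  unfold hitP
  by_cases h : (d.get? "field_name" == some "product" && d.contains "added") = true
  · rw [if_pos h, if_pos h]
  · rw [if_neg h, if_neg h]; rfl

lemma pickC (d : PySem.Dict String String) (x : String) :
    (if d.get? "field_name" == some "component" && d.contains "added" then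
       (d.get? "added").getD x else x) = (hitC d).getD x := by
  unfold hitC
  by_cases h : (d.get? "field_name" == some "component" && d.contains "added") = true
  · rw [if_pos h, if_pos h]
  · rw [if_neg h, if_neg h]; rfl

lemma stepA_eq (p c : String) (change : List (String × String)) :
    stepA (p, c) change =
      ((hitP (PySem.Dict.mk change)).getD p, (hitC (PySem.Dict.mk change)).getD c) := by
  unfold stepA
  rw [← pickP, ← pickC]

lemma or_getD (o o' : Option String) (d : String) :
    (o.or o').getD d = o.getD (o'.getD d) := by cases o <;> rfl

lemma findSome?_single {α β : Type} (f : α → Option β) (x : α) :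
    List.findSome? f [x] = f x := by
  cases h : f x <;> simp [h]

/-- A's fold keeps the LAST matching values = the first matching values of the reversed list. -/
lemma foldA_eq (l : List (List (String × String))) : ∀ (p c : String),
    l.foldl stepA (p, c) =
      ((l.reverse.findSome? (fun ch => hitP (PySem.Dict.mk ch))).getD p,
       (l.reverse.findSome? (fun ch => hitC (PySem.Dict.mk ch))).getD c) := by
  induction l with
  | nil => intro p c; simp
  | cons x xs ih =>
    intro p c
    rw [List.foldl_cons, stepA_eq, ih]
    simp only [List.reverse_cons, List.findSome?_append, findSome?_single]
    rw [or_getD, or_getD]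

/-- B's early-exiting scan keeps the FIRST matching values of its list. -/
lemma goB_eq (l : List (List (String × String))) : ∀ (fp fc : Bool) (p c : String),
    getPcGo l fp fc p c =
      ((if fp then p else (l.findSome? (fun ch => hitP (PySem.Dict.mk ch))).getD p),
       (if fc then c else (l.findSome? (fun ch => hitC (PySem.Dict.mk ch))).getD c)) := by
  induction l with
  | nil => intro fp fc p c; cases fp <;> cases fc <;> simp [getPcGo]
  | cons x xs ih =>
    intro fp fc p c
    rw [getPcGo]
    simp only [List.findSome?_cons]
    generalize PySem.Dict.mk x = d
    by_cases h1 : (!fp && (d.get? "field_name" == some "product") && d.contains "added") = true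
    · -- product branch fires
      have h1' := h1
      simp only [Bool.and_eq_true, Bool.not_eq_true'] at h1'
      obtain ⟨⟨hfp', hA⟩, hB⟩ := h1'
      have hfn : d.get? "field_name" = some "product" := by simpa using hA
      have hP : hitP d = d.get? "added" := by
        unfold hitP; rw [if_pos (by rw [hA, hB]; rfl)]
      have hC : hitC d = none := by
        unfold hitC; rw [hfn]; simp
      obtain ⟨v, hv⟩ := get?_some_of_contains d "added" hB
      rw [if_pos h1, hfp']
      cases fc with
      | true =>
        rw [if_pos rfl]
        simp [hP, hv]
      | false =>
        rw [if_neg (by decide), ih]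
        simp [hP, hC, hv]
    · rw [if_neg h1]
      by_cases h2 : (!fc && (d.get? "field_name" == some "component") && d.contains "added") = true
      · -- component branch fires
        have h2' := h2
        simp only [Bool.and_eq_true, Bool.not_eq_true'] at h2'
        obtain ⟨⟨hfc', hA⟩, hB⟩ := h2'
        have hfn : d.get? "field_name" = some "component" := by simpa using hA
        have hC : hitC d = d.get? "added" := by
          unfold hitC; rw [if_pos (by rw [hA, hB]; rfl)]
        have hP : hitP d = none := by
          unfold hitP; rw [hfn]; simp
        obtain ⟨v, hv⟩ := get?_some_of_contains d "added" hB
        rw [if_pos h2, hfc']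
        cases fp with
        | true =>
          rw [if_pos rfl]
          simp [hC, hv]
        | false =>
          rw [if_neg (by decide), ih]
          simp [hP, hC, hv]
      · -- neither branch fires
        rw [if_neg h2]
        have hPn : fp = false → hitP d = none := by
          intro hfp
          unfold hitP
          rw [if_neg]
          intro hc
          exact h1 (by rw [hfp]; simpa using hc)
        have hCn : fc = false → hitC d = none := by
          intro hfc
          unfold hitC
          rw [if_neg]
          intro hc
          exact h2 (by rw [hfc]; simpa using hc)
        cases fp with
        | true =>
          cases fc with
          | true => rw [if_pos rfl]; simp
          | false =>
            rw [if_neg (by decide), ih]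
            simp [hCn rfl]
        | false =>
          simp only [Bool.false_and, Bool.false_eq_true, if_false]
          rw [ih]
          cases fc with
          | true => simp [hPn rfl]
          | false => simp [hPn rfl, hCn rfl]

-- ===== VERDICT (by name: the statement is the Claim_ definition above) =====
theorem get_pc_spec : Claim_equal_get_pc := by
  intro changes _
  unfold Spec_get_pc get_pc get_pc_alt
  rw [foldA_eq, goB_eq]
  simp
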